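-- pv_equiv track=rewrite | github.com/AreteDriver/LinuxTools | likx/src/hotkeys.py | _gtk_to_kde_shortcut
-- ===== SOURCE A (Python) =====
-- def _gtk_to_kde_shortcut(gtk_combo: str) -> str:
--     """Convert GTK accelerator format to KDE shortcut format.
--
--     Example: '<Super><Shift>S' -> 'Meta+Shift+S'
--     """
--     mapping = {
--         "<Control>": "Ctrl+",
--         "<Ctrl>": "Ctrl+",
--         "<Shift>": "Shift+",
--         "<Alt>": "Alt+",
--         "<Super>": "Meta+",
--         "<Meta>": "Meta+",
--     }
--
--     result = gtk_combo
--     for gtk_mod, kde_mod in mapping.items():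
--         result = result.replace(gtk_mod, kde_mod)
--
--     # Clean up: remove angle brackets from key name if any remain
--     result = result.replace("<", "").replace(">", "")
--     return result if result else ""
-- ===== SOURCE B (Python) =====
-- def _gtk_to_kde_shortcut(gtk_combo: str) -> str:
--     """Convert GTK accelerator format to KDE shortcut format (single scan)."""
--     mapping = (
--         ("<Control>", "Ctrl+"),
--         ("<Ctrl>", "Ctrl+"),
--         ("<Shift>", "Shift+"),
--         ("<Alt>", "Alt+"),
--         ("<Super>", "Meta+"),
--         ("<Meta>", "Meta+"),
--     )
--     out = []
--     i = 0
--     n = len(gtk_combo)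
--     while i < n:
--         for tok, kde in mapping:
--             if gtk_combo.startswith(tok, i):
--                 out.append(kde)
--                 i += len(tok)
--                 break
--         else:
--             c = gtk_combo[i]
--             if c != "<" and c != ">":
--                 out.append(c)
--             i += 1
--     return "".join(out)
-- ===== Notes on version B (the rewrite author's own statement) =====
-- stated objective: alternative
-- what changed: Replaces six full-string replace passes plus two bracket-strip passes with a single left-to-right scan that classifies each position (known modifier token, stray bracket, ordinary char) and emits output pieces once.
import Mathlib
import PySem

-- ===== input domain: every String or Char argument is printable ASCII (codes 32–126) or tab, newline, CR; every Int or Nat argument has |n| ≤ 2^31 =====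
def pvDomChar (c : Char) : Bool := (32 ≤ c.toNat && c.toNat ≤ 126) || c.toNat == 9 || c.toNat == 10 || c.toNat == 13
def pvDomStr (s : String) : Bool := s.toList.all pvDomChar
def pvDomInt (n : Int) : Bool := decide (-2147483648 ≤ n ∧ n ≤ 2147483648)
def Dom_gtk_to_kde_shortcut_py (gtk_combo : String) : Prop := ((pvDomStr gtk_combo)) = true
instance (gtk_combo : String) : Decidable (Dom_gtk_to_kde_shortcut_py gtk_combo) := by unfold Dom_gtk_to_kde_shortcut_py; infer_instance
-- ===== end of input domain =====

-- B replaces A's six sequential replace passes (plus two bracket-strip passes) by ONE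
-- left-to-right scan that classifies each position: known modifier token, stray bracket,
-- or ordinary character (objective: alternative decomposition, single pass).

-- ===== PORT A =====
def gtk_to_kde_shortcut_py (gtk_combo : String) : String :=
  let result := gtk_combo
  let result := PySem.Str.replace result "<Control>" "Ctrl+"
  let result := PySem.Str.replace result "<Ctrl>" "Ctrl+"
  let result := PySem.Str.replace result "<Shift>" "Shift+"
  let result := PySem.Str.replace result "<Alt>" "Alt+"
  let result := PySem.Str.replace result "<Super>" "Meta+"
  let result := PySem.Str.replace result "<Meta>" "Meta+"
  let result := PySem.Str.replace (PySem.Str.replace result "<" "") ">" ""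
  if result ≠ "" then result else ""

-- ===== PORT B =====
-- the (token, kde) mapping of Source B, in order
def pvTokens : List (List Char × List Char) :=
  [("<Control>".toList, "Ctrl+".toList),
   ("<Ctrl>".toList, "Ctrl+".toList),
   ("<Shift>".toList, "Shift+".toList),
   ("<Alt>".toList, "Alt+".toList),
   ("<Super>".toList, "Meta+".toList),
   ("<Meta>".toList, "Meta+".toList)]

-- Source B's inner for-loop with break: first mapping entry whose token starts here
def pvFindTok : List (List Char × List Char) → List Char → Option (List Char × Nat)
  | [], _ => none
  | (tok, kde) :: rest, l => if tok.isPrefixOf l then some (kde, tok.length) else pvFindTok rest l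

-- Source B's while-loop: emit a matched token's KDE form and jump past it, skip stray
-- brackets, copy any other char (advancing i by k over c::t is dropping k-1 from t)
def pvScan (l : List Char) : List Char :=
  match l with
  | [] => []
  | c :: t =>
    match pvFindTok pvTokens (c :: t) with
    | some (kde, k) => kde ++ pvScan (t.drop (k - 1))
    | none => if c ≠ '<' ∧ c ≠ '>' then c :: pvScan t else pvScan t
termination_by l.length
decreasing_by
  all_goals simp [List.length_drop]

def gtk_to_kde_shortcut_py_alt (gtk_combo : String) : String :=
  String.ofList (pvScan gtk_combo.toList)

-- ===== PRECONDITION & SPEC =====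
def Spec_gtk_to_kde_shortcut_py (gtk_combo : String) (out : String) : Prop := out = gtk_to_kde_shortcut_py_alt gtk_combo
instance (gtk_combo : String) (out : String) : Decidable (Spec_gtk_to_kde_shortcut_py gtk_combo out) := by unfold Spec_gtk_to_kde_shortcut_py; infer_instance

-- ===== CLAIM (what is proved, stated in full; the proofs are below) =====
def Claim_equal_gtk_to_kde_shortcut_py : Prop := ∀ (gtk_combo : String), Dom_gtk_to_kde_shortcut_py gtk_combo → Spec_gtk_to_kde_shortcut_py gtk_combo (gtk_to_kde_shortcut_py gtk_combo)

-- ===== LEMMAS AND PROOFS =====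

-- fuel-free reformulation of PySem.Chars.replace (for nonempty patterns)
def repF (old new : List Char) (l : List Char) : List Char :=
  match l with
  | [] => []
  | c :: t =>
    if old ≠ [] ∧ old.isPrefixOf (c :: t) then new ++ repF old new (t.drop (old.length - 1))
    else c :: repF old new t
termination_by l.length
decreasing_by
  all_goals simp [List.length_drop]

theorem repF_nil (old new : List Char) : repF old new [] = [] := by simp [repF]

theorem replace_go_eq (old new : List Char) (hold : old ≠ []) :
    ∀ fuel l acc, l.length ≤ fuel →
      PySem.Chars.replace.go old new fuel l acc = acc.reverse ++ repF old new l := by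
  intro fuel
  induction fuel with
  | zero =>
    intro l acc h
    have : l = [] := List.eq_nil_of_length_eq_zero (Nat.le_zero.mp h)
    subst this
    simp [PySem.Chars.replace.go, repF]
  | succ n ih =>
    intro l acc h
    cases l with
    | nil => simp [PySem.Chars.replace.go, repF]
    | cons c t =>
      by_cases hp : old.isPrefixOf (c :: t)
      · rw [PySem.Chars.replace.go]
        simp only [hp, if_true]
        have hlen : ((c :: t).drop old.length).length ≤ n := by
          have h1 : 1 ≤ old.length := List.length_pos_of_ne_nil hold
          simp [List.length_drop] at *
          omega
        rw [ih _ _ hlen]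
        have hdrop : (c :: t).drop old.length = t.drop (old.length - 1) := by
          cases old with
          | nil => exact absurd rfl hold
          | cons d o' => simp
        rw [hdrop]
        rw [repF]
        simp [hold, hp]
      · rw [PySem.Chars.replace.go]
        simp only [hp]
        have hlen : t.length ≤ n := by simp at h; omega
        rw [ih _ _ hlen]
        rw [repF]
        simp [hp]

theorem replace_eq_repF (l old new : List Char) (hold : old ≠ []) :
    PySem.Chars.replace l old new = repF old new l := by
  unfold PySem.Chars.replace
  simp only [List.isEmpty_iff, hold, if_false]
  have := replace_go_eq old new hold l.length l [] (le_refl _)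
  simpa using this

-- repF unfolding on a matched pattern at the head
theorem repF_pos (old new v : List Char) (hold : old ≠ []) :
    repF old new (old ++ v) = new ++ repF old new v := by
  cases old with
  | nil => exact absurd rfl hold
  | cons d o' =>
    rw [show (d :: o') ++ v = d :: (o' ++ v) by simp, repF]
    have hpre : (d :: o').isPrefixOf (d :: (o' ++ v)) := by
      rw [List.isPrefixOf_iff_prefix]
      exact List.cons_prefix_cons.mpr ⟨rfl, List.prefix_append _ _⟩
    simp [hpre]

-- repF unfolding when the pattern does not match at the head
theorem repF_neg (old new : List Char) (c : Char) (t : List Char) (h : ¬ old <+: (c :: t)) :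
    repF old new (c :: t) = c :: repF old new t := by
  rw [repF]
  rw [if_neg]
  rintro ⟨-, hp⟩
  exact h (List.isPrefixOf_iff_prefix.mp hp)

-- 'tok cannot start anywhere inside u, whatever follows'
def Blocks (u tok : List Char) : Prop :=
  ∀ w v, w <:+ u → w ≠ [] → ¬ tok <+: (w ++ v)

theorem prefix_append_cases {p a b : List Char} (h : p <+: a ++ b) : p <+: a ∨ a <+: p := by
  have hp : (a ++ b).take p.length = p := List.prefix_iff_eq_take.mp h |>.symm
  rcases Nat.le_total p.length a.length with h1 | h1
  · left
    rw [List.take_append_of_le_length h1] at hp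
    exact hp ▸ List.take_prefix _ _
  · right
    rw [List.take_append, List.take_of_length_le h1] at hp
    exact ⟨List.take (p.length - a.length) b, hp⟩

-- decidable criterion for Blocks
def blocksB (u tok : List Char) : Bool :=
  u.tails.all (fun w => w.isEmpty || (!(tok.isPrefixOf w) && !(w.isPrefixOf tok)))

theorem blocks_of_B {u tok : List Char} (h : blocksB u tok = true) : Blocks u tok := by
  intro w v hw hne hp
  have hmem : w ∈ u.tails := (List.mem_tails _ _).mpr hw
  have hq := List.all_eq_true.mp h w hmem
  simp only [Bool.or_eq_true, Bool.and_eq_true, Bool.not_eq_true'] at hq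
  rcases hq with h1 | ⟨h1, h2⟩
  · exact hne (List.isEmpty_iff.mp h1)
  · rcases prefix_append_cases hp with hc | hc
    · rw [← List.isPrefixOf_iff_prefix] at hc; simp [hc] at h1
    · rw [← List.isPrefixOf_iff_prefix] at hc; simp [hc] at h2

theorem blocks_single (c : Char) (tok : List Char) (d : Char) (l' : List Char)
    (htok : tok = d :: l') (hne : d ≠ c) : Blocks [c] tok := by
  intro w v hw hwne hp
  rcases hw with ⟨s, hs⟩
  rcases w with _ | ⟨a, w'⟩
  · exact hwne rfl
  · rcases s with _ | ⟨b, s'⟩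
    · simp only [List.nil_append, List.cons.injEq] at hs
      obtain ⟨rfl, rfl⟩ := hs
      subst htok
      exact hne (List.cons_prefix_cons.mp hp).1
    · simp only [List.cons_append, List.cons.injEq] at hs
      exact absurd hs.2 (by simp)

theorem blocks_suffix {u u' tok : List Char} (hsuf : u' <:+ u) (hb : Blocks u tok) :
    Blocks u' tok :=
  fun w v hw hne => hb w v (hw.trans hsuf) hne

-- pass a replace over a blocked prefix
theorem repF_pass (old new u v : List Char) (hb : Blocks u old) :
    repF old new (u ++ v) = u ++ repF old new v := by
  induction u with
  | nil => simp
  | cons a u' ih =>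
    simp only [List.cons_append]
    have hh : ¬ old <+: a :: (u' ++ v) := by
      simpa using hb (a :: u') v (List.suffix_refl _) (by simp)
    rw [repF_neg _ _ _ _ hh]
    rw [ih (blocks_suffix (List.suffix_cons _ _) hb)]

-- the six replace passes as a fold
def chain (ps : List (List Char × List Char)) (l : List Char) : List Char :=
  ps.foldl (fun s p => repF p.1 p.2 s) l

theorem chain_append (xs ys : List (List Char × List Char)) (l : List Char) :
    chain (xs ++ ys) l = chain ys (chain xs l) := List.foldl_append

theorem chain_cons (p : List Char × List Char) (ps : List (List Char × List Char)) (l : List Char) :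
    chain (p :: ps) l = chain ps (repF p.1 p.2 l) := rfl

theorem chain_pass (ps : List (List Char × List Char)) (u : List Char)
    (h : ∀ p ∈ ps, Blocks u p.1) :
    ∀ v, chain ps (u ++ v) = u ++ chain ps v := by
  induction ps with
  | nil => intro v; rfl
  | cons p ps' ih =>
    intro v
    show chain ps' (repF p.1 p.2 (u ++ v)) = u ++ chain ps' (repF p.1 p.2 v)
    rw [repF_pass _ _ _ _ (h p List.mem_cons_self)]
    exact ih (fun q hq => h q (List.mem_cons_of_mem _ hq)) _

-- replacing with a kde value ('+' inside, no '>') cannot create a letters-then-'>' prefix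
theorem repF_gt_aux (tok kde : List Char) (hold : tok ≠ [])
    (hk1 : '+' ∈ kde) (hk2 : '>' ∉ kde) :
    ∀ n l, l.length ≤ n → ∀ w, '>' ∉ w → '+' ∉ w →
      w ++ ['>'] <+: repF tok kde l → w ++ ['>'] <+: l := by
  intro n
  induction n with
  | zero =>
    intro l hl w _ _ hp
    have : l = [] := List.eq_nil_of_length_eq_zero (Nat.le_zero.mp hl)
    subst this
    rw [repF_nil] at hp
    simp [List.prefix_nil] at hp
  | succ n ih =>
    intro l hl w hw1 hw2 hp
    cases l with
    | nil =>
      rw [repF_nil] at hp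
      simp [List.prefix_nil] at hp
    | cons c t =>
      by_cases hpre : tok <+: (c :: t)
      · rw [repF, if_pos ⟨hold, List.isPrefixOf_iff_prefix.mpr hpre⟩] at hp
        rcases prefix_append_cases hp with hc | hc
        · exact absurd (hc.subset (by simp)) hk2
        · have hplus : ('+' : Char) ∈ w ++ ['>'] := hc.subset hk1
          simp at hplus
          exact absurd hplus hw2
      · rw [repF_neg _ _ _ _ hpre] at hp
        cases w with
        | nil =>
          simp only [List.nil_append] at hp ⊢
          exact List.cons_prefix_cons.mpr ⟨(List.cons_prefix_cons.mp hp).1, List.nil_prefix⟩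
        | cons a w' =>
          simp only [List.cons_append] at hp ⊢
          obtain ⟨hac, hp'⟩ := List.cons_prefix_cons.mp hp
          have hrec := ih t (by simp at hl; omega) w'
            (by simp at hw1; tauto) (by simp at hw2; tauto) hp'
          exact List.cons_prefix_cons.mpr ⟨hac, hrec⟩

theorem repF_gt (tok kde : List Char) (hold : tok ≠ [])
    (hk1 : '+' ∈ kde) (hk2 : '>' ∉ kde) (l w : List Char)
    (hw1 : '>' ∉ w) (hw2 : '+' ∉ w)
    (hp : w ++ ['>'] <+: repF tok kde l) : w ++ ['>'] <+: l :=
  repF_gt_aux tok kde hold hk1 hk2 l.length l le_rfl w hw1 hw2 hp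

-- shape of each mapping entry: token '<' ++ letters ++ '>', kde has '+' and no '>'
def Shape (p : List Char × List Char) : Prop :=
  (∃ w, p.1 = '<' :: (w ++ ['>']) ∧ '>' ∉ w ∧ '+' ∉ w) ∧ '+' ∈ p.2 ∧ '>' ∉ p.2

theorem shape_tokens : ∀ p ∈ pvTokens, Shape p := by
  intro p hp
  simp only [pvTokens, List.mem_cons, List.not_mem_nil, or_false] at hp
  rcases hp with rfl | rfl | rfl | rfl | rfl | rfl
  · exact ⟨⟨"Control".toList, by decide, by decide, by decide⟩, by decide, by decide⟩
  · exact ⟨⟨"Ctrl".toList, by decide, by decide, by decide⟩, by decide, by decide⟩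
  · exact ⟨⟨"Shift".toList, by decide, by decide, by decide⟩, by decide, by decide⟩
  · exact ⟨⟨"Alt".toList, by decide, by decide, by decide⟩, by decide, by decide⟩
  · exact ⟨⟨"Super".toList, by decide, by decide, by decide⟩, by decide, by decide⟩
  · exact ⟨⟨"Meta".toList, by decide, by decide, by decide⟩, by decide, by decide⟩

-- if no token matches at '<', the whole chain just walks past the '<'
theorem chain_cons_lt (ps : List (List Char × List Char)) (hps : ∀ p ∈ ps, Shape p) :
    ∀ t, (∀ p ∈ ps, ¬ p.1 <+: '<' :: t) → chain ps ('<' :: t) = '<' :: chain ps t := by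
  induction ps with
  | nil => intro t _; rfl
  | cons p ps' ih =>
    intro t h
    show chain ps' (repF p.1 p.2 ('<' :: t)) = '<' :: chain ps' (repF p.1 p.2 t)
    rw [repF_neg _ _ _ _ (h p List.mem_cons_self)]
    apply ih (fun q hq => hps q (List.mem_cons_of_mem _ hq))
    intro q hq hcontra
    obtain ⟨⟨wq, hq1, hq2, hq3⟩, -, -⟩ := hps q (List.mem_cons_of_mem _ hq)
    obtain ⟨⟨wp, hp1, -, -⟩, hpk1, hpk2⟩ := hps p List.mem_cons_self
    rw [hq1] at hcontra
    have h2 : wq ++ ['>'] <+: repF p.1 p.2 t := (List.cons_prefix_cons.mp hcontra).2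
    have h3 : wq ++ ['>'] <+: t :=
      repF_gt p.1 p.2 (by rw [hp1]; simp) hpk1 hpk2 t wq hq2 hq3 h2
    exact h q (List.mem_cons_of_mem _ hq) (by rw [hq1]; exact List.cons_prefix_cons.mpr ⟨rfl, h3⟩)

-- A's whole pipeline, on char lists
def F (l : List Char) : List Char :=
  repF ">".toList "".toList (repF "<".toList "".toList (chain pvTokens l))

theorem A_toList (s : String) : (gtk_to_kde_shortcut_py s).toList = F s.toList := by
  unfold gtk_to_kde_shortcut_py
  set r := PySem.Str.replace (PySem.Str.replace (PySem.Str.replace (PySem.Str.replace (PySem.Str.replace (PySem.Str.replace (PySem.Str.replace (PySem.Str.replace s "<Control>" "Ctrl+") "<Ctrl>" "Ctrl+") "<Shift>" "Shift+") "<Alt>" "Alt+") "<Super>" "Meta+") "<Meta>" "Meta+") "<" "") ">" "" with hr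
  have hif : (if r ≠ "" then r else "") = r := by
    by_cases h : r = "" <;> simp [h]
  rw [hif, hr]
  simp only [PySem.Str.toList_replace]
  rw [replace_eq_repF _ _ _ (by decide), replace_eq_repF _ _ _ (by decide),
      replace_eq_repF _ _ _ (by decide), replace_eq_repF _ _ _ (by decide),
      replace_eq_repF _ _ _ (by decide), replace_eq_repF _ _ _ (by decide),
      replace_eq_repF _ _ _ (by decide), replace_eq_repF _ _ _ (by decide)]
  rfl

theorem F_nil : F [] = [] := by
  simp [F, chain, pvTokens, List.foldl, repF_nil]

-- F on a matched token (pre/post are the mapping entries before/after it)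
theorem F_tok (pre post : List (List Char × List Char)) (tok kde rest : List Char)
    (hsplit : pvTokens = pre ++ (tok, kde) :: post)
    (hpre : ∀ p ∈ pre, blocksB tok p.1 = true)
    (hpost : ∀ p ∈ post, blocksB kde p.1 = true)
    (hk1 : blocksB kde "<".toList = true) (hk2 : blocksB kde ">".toList = true)
    (htok : tok ≠ []) :
    F (tok ++ rest) = kde ++ F rest := by
  unfold F
  rw [hsplit, chain_append, chain_append,
      chain_pass pre tok (fun p hp => blocks_of_B (hpre p hp)) rest,
      chain_cons, chain_cons,
      repF_pos _ _ _ htok,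
      chain_pass post kde (fun p hp => blocks_of_B (hpost p hp)) _,
      repF_pass _ _ kde _ (blocks_of_B hk1),
      repF_pass _ _ kde _ (blocks_of_B hk2)]

-- F on an ordinary character
theorem F_cons_other (c : Char) (t : List Char) (h1 : c ≠ '<') (h2 : c ≠ '>') :
    F (c :: t) = c :: F t := by
  have hb : ∀ p ∈ pvTokens, Blocks [c] p.1 := by
    intro p hp
    simp only [pvTokens, List.mem_cons, List.not_mem_nil, or_false] at hp
    rcases hp with rfl | rfl | rfl | rfl | rfl | rfl
    · exact blocks_single c "<Control>".toList '<' "Control>".toList rfl (Ne.symm h1)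
    · exact blocks_single c "<Ctrl>".toList '<' "Ctrl>".toList rfl (Ne.symm h1)
    · exact blocks_single c "<Shift>".toList '<' "Shift>".toList rfl (Ne.symm h1)
    · exact blocks_single c "<Alt>".toList '<' "Alt>".toList rfl (Ne.symm h1)
    · exact blocks_single c "<Super>".toList '<' "Super>".toList rfl (Ne.symm h1)
    · exact blocks_single c "<Meta>".toList '<' "Meta>".toList rfl (Ne.symm h1)
  unfold F
  rw [show (c :: t) = [c] ++ t from rfl]
  rw [chain_pass pvTokens [c] hb t]
  rw [repF_pass "<".toList "".toList [c] _ (blocks_single c "<".toList '<' [] rfl (Ne.symm h1))]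
  rw [repF_pass ">".toList "".toList [c] _ (blocks_single c ">".toList '>' [] rfl (Ne.symm h2))]
  rfl

-- F on a stray '>'
theorem F_cons_gt (t : List Char) : F ('>' :: t) = F t := by
  have hb : ∀ p ∈ pvTokens, Blocks ['>'] p.1 := by
    intro p hp
    simp only [pvTokens, List.mem_cons, List.not_mem_nil, or_false] at hp
    rcases hp with rfl | rfl | rfl | rfl | rfl | rfl
    · exact blocks_single '>' "<Control>".toList '<' "Control>".toList rfl (by decide)
    · exact blocks_single '>' "<Ctrl>".toList '<' "Ctrl>".toList rfl (by decide)
    · exact blocks_single '>' "<Shift>".toList '<' "Shift>".toList rfl (by decide)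
    · exact blocks_single '>' "<Alt>".toList '<' "Alt>".toList rfl (by decide)
    · exact blocks_single '>' "<Super>".toList '<' "Super>".toList rfl (by decide)
    · exact blocks_single '>' "<Meta>".toList '<' "Meta>".toList rfl (by decide)
  unfold F
  rw [show ('>' :: t) = ['>'] ++ t from rfl]
  rw [chain_pass pvTokens ['>'] hb t]
  rw [repF_pass "<".toList "".toList ['>'] _ (blocks_single '>' "<".toList '<' [] rfl (by decide))]
  rw [show (['>'] ++ repF "<".toList "".toList (chain pvTokens t)) = ">".toList ++ repF "<".toList "".toList (chain pvTokens t) from rfl]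
  rw [repF_pos ">".toList "".toList _ (by decide)]
  rfl

-- F on a stray '<' (no token matches here)
theorem F_cons_lt (t : List Char) (h : ∀ p ∈ pvTokens, ¬ p.1 <+: '<' :: t) :
    F ('<' :: t) = F t := by
  unfold F
  rw [chain_cons_lt pvTokens shape_tokens t h]
  rw [show ('<' :: chain pvTokens t) = "<".toList ++ chain pvTokens t from rfl]
  rw [repF_pos "<".toList "".toList _ (by decide)]
  rfl

-- the main induction: B's single scan equals A's eight passes
theorem scan_eq_F : ∀ n l, l.length ≤ n → pvScan l = F l := by
  intro n
  induction n with
  | zero =>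
    intro l hl
    have : l = [] := List.eq_nil_of_length_eq_zero (Nat.le_zero.mp hl)
    subst this
    rw [pvScan, F_nil]
  | succ n ih =>
    intro l hl
    cases l with
    | nil => rw [pvScan, F_nil]
    | cons c t =>
      rw [pvScan]
      by_cases h1 : "<Control>".toList.isPrefixOf (c :: t)
      · obtain ⟨rest, hrest⟩ := List.isPrefixOf_iff_prefix.mp h1
        have hx : ('<' :: ("Control>".toList ++ rest)) = c :: t := hrest
        injection hx with hc ht2
        subst hc
        subst ht2
        simp only [pvFindTok, pvTokens, h1, if_true]
        have hlr : rest.length ≤ n := by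
          have h8 : ("Control>".toList).length = 8 := by decide
          simp only [List.length_cons, List.length_append, h8] at hl
          omega
        rw [show ("<Control>".toList.length - 1) = 8 by decide]
        rw [List.drop_left' (show ("Control>".toList).length = 8 by decide)]
        rw [ih rest hlr]
        rw [show ('<' :: ("Control>".toList ++ rest)) = "<Control>".toList ++ rest from rfl]
        rw [F_tok [] [("<Ctrl>".toList, "Ctrl+".toList), ("<Shift>".toList, "Shift+".toList), ("<Alt>".toList, "Alt+".toList), ("<Super>".toList, "Meta+".toList), ("<Meta>".toList, "Meta+".toList)] "<Control>".toList "Ctrl+".toList rest rfl (by decide) (by decide) (by decide) (by decide) (by decide)]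
      ·
        by_cases h2 : "<Ctrl>".toList.isPrefixOf (c :: t)
        · obtain ⟨rest, hrest⟩ := List.isPrefixOf_iff_prefix.mp h2
          have hx : ('<' :: ("Ctrl>".toList ++ rest)) = c :: t := hrest
          injection hx with hc ht2
          subst hc
          subst ht2
          simp only [pvFindTok, pvTokens, h1, h2, Bool.false_eq_true, if_true, if_false]
          have hlr : rest.length ≤ n := by
            have h8 : ("Ctrl>".toList).length = 5 := by decide
            simp only [List.length_cons, List.length_append, h8] at hl
            omega
          rw [show ("<Ctrl>".toList.length - 1) = 5 by decide]
          rw [List.drop_left' (show ("Ctrl>".toList).length = 5 by decide)]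
          rw [ih rest hlr]
          rw [show ('<' :: ("Ctrl>".toList ++ rest)) = "<Ctrl>".toList ++ rest from rfl]
          rw [F_tok [("<Control>".toList, "Ctrl+".toList)] [("<Shift>".toList, "Shift+".toList), ("<Alt>".toList, "Alt+".toList), ("<Super>".toList, "Meta+".toList), ("<Meta>".toList, "Meta+".toList)] "<Ctrl>".toList "Ctrl+".toList rest rfl (by decide) (by decide) (by decide) (by decide) (by decide)]
        ·
          by_cases h3 : "<Shift>".toList.isPrefixOf (c :: t)
          · obtain ⟨rest, hrest⟩ := List.isPrefixOf_iff_prefix.mp h3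
            have hx : ('<' :: ("Shift>".toList ++ rest)) = c :: t := hrest
            injection hx with hc ht2
            subst hc
            subst ht2
            simp only [pvFindTok, pvTokens, h1, h2, h3, Bool.false_eq_true, if_true, if_false]
            have hlr : rest.length ≤ n := by
              have h8 : ("Shift>".toList).length = 6 := by decide
              simp only [List.length_cons, List.length_append, h8] at hl
              omega
            rw [show ("<Shift>".toList.length - 1) = 6 by decide]
            rw [List.drop_left' (show ("Shift>".toList).length = 6 by decide)]
            rw [ih rest hlr]
            rw [show ('<' :: ("Shift>".toList ++ rest)) = "<Shift>".toList ++ rest from rfl]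
            rw [F_tok [("<Control>".toList, "Ctrl+".toList), ("<Ctrl>".toList, "Ctrl+".toList)] [("<Alt>".toList, "Alt+".toList), ("<Super>".toList, "Meta+".toList), ("<Meta>".toList, "Meta+".toList)] "<Shift>".toList "Shift+".toList rest rfl (by decide) (by decide) (by decide) (by decide) (by decide)]
          ·
            by_cases h4 : "<Alt>".toList.isPrefixOf (c :: t)
            · obtain ⟨rest, hrest⟩ := List.isPrefixOf_iff_prefix.mp h4
              have hx : ('<' :: ("Alt>".toList ++ rest)) = c :: t := hrest
              injection hx with hc ht2
              subst hc
              subst ht2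
              simp only [pvFindTok, pvTokens, h1, h2, h3, h4, Bool.false_eq_true, if_true, if_false]
              have hlr : rest.length ≤ n := by
                have h8 : ("Alt>".toList).length = 4 := by decide
                simp only [List.length_cons, List.length_append, h8] at hl
                omega
              rw [show ("<Alt>".toList.length - 1) = 4 by decide]
              rw [List.drop_left' (show ("Alt>".toList).length = 4 by decide)]
              rw [ih rest hlr]
              rw [show ('<' :: ("Alt>".toList ++ rest)) = "<Alt>".toList ++ rest from rfl]
              rw [F_tok [("<Control>".toList, "Ctrl+".toList), ("<Ctrl>".toList, "Ctrl+".toList), ("<Shift>".toList, "Shift+".toList)] [("<Super>".toList, "Meta+".toList), ("<Meta>".toList, "Meta+".toList)] "<Alt>".toList "Alt+".toList rest rfl (by decide) (by decide) (by decide) (by decide) (by decide)]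
            ·
              by_cases h5 : "<Super>".toList.isPrefixOf (c :: t)
              · obtain ⟨rest, hrest⟩ := List.isPrefixOf_iff_prefix.mp h5
                have hx : ('<' :: ("Super>".toList ++ rest)) = c :: t := hrest
                injection hx with hc ht2
                subst hc
                subst ht2
                simp only [pvFindTok, pvTokens, h1, h2, h3, h4, h5, Bool.false_eq_true, if_true, if_false]
                have hlr : rest.length ≤ n := by
                  have h8 : ("Super>".toList).length = 6 := by decide
                  simp only [List.length_cons, List.length_append, h8] at hl
                  omega
                rw [show ("<Super>".toList.length - 1) = 6 by decide]
                rw [List.drop_left' (show ("Super>".toList).length = 6 by decide)]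
                rw [ih rest hlr]
                rw [show ('<' :: ("Super>".toList ++ rest)) = "<Super>".toList ++ rest from rfl]
                rw [F_tok [("<Control>".toList, "Ctrl+".toList), ("<Ctrl>".toList, "Ctrl+".toList), ("<Shift>".toList, "Shift+".toList), ("<Alt>".toList, "Alt+".toList)] [("<Meta>".toList, "Meta+".toList)] "<Super>".toList "Meta+".toList rest rfl (by decide) (by decide) (by decide) (by decide) (by decide)]
              ·
                by_cases h6 : "<Meta>".toList.isPrefixOf (c :: t)
                · obtain ⟨rest, hrest⟩ := List.isPrefixOf_iff_prefix.mp h6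
                  have hx : ('<' :: ("Meta>".toList ++ rest)) = c :: t := hrest
                  injection hx with hc ht2
                  subst hc
                  subst ht2
                  simp only [pvFindTok, pvTokens, h1, h2, h3, h4, h5, h6, Bool.false_eq_true, if_true, if_false]
                  have hlr : rest.length ≤ n := by
                    have h8 : ("Meta>".toList).length = 5 := by decide
                    simp only [List.length_cons, List.length_append, h8] at hl
                    omega
                  rw [show ("<Meta>".toList.length - 1) = 5 by decide]
                  rw [List.drop_left' (show ("Meta>".toList).length = 5 by decide)]
                  rw [ih rest hlr]
                  rw [show ('<' :: ("Meta>".toList ++ rest)) = "<Meta>".toList ++ rest from rfl]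
                  rw [F_tok [("<Control>".toList, "Ctrl+".toList), ("<Ctrl>".toList, "Ctrl+".toList), ("<Shift>".toList, "Shift+".toList), ("<Alt>".toList, "Alt+".toList), ("<Super>".toList, "Meta+".toList)] [] "<Meta>".toList "Meta+".toList rest rfl (by decide) (by decide) (by decide) (by decide) (by decide)]
                ·
                  simp only [pvFindTok, pvTokens, h1, h2, h3, h4, h5, h6, Bool.false_eq_true, if_false]
                  have hnotok : ∀ p ∈ pvTokens, ¬ p.1 <+: (c :: t) := by
                    intro p hp
                    simp only [pvTokens, List.mem_cons, List.not_mem_nil, or_false] at hp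
                    rcases hp with rfl | rfl | rfl | rfl | rfl | rfl
                    · exact fun hc => h1 (List.isPrefixOf_iff_prefix.mpr hc)
                    · exact fun hc => h2 (List.isPrefixOf_iff_prefix.mpr hc)
                    · exact fun hc => h3 (List.isPrefixOf_iff_prefix.mpr hc)
                    · exact fun hc => h4 (List.isPrefixOf_iff_prefix.mpr hc)
                    · exact fun hc => h5 (List.isPrefixOf_iff_prefix.mpr hc)
                    · exact fun hc => h6 (List.isPrefixOf_iff_prefix.mpr hc)
                  have hlt : t.length ≤ n := by simp at hl; omega
                  by_cases hc1 : c = '<'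
                  · subst hc1
                    simp only [ne_eq, not_true_eq_false, false_and, if_false]
                    rw [ih t hlt, F_cons_lt t hnotok]
                  · by_cases hc2 : c = '>'
                    · subst hc2
                      simp only [ne_eq, not_true_eq_false, and_false, if_false]
                      rw [ih t hlt, F_cons_gt]
                    · simp only [ne_eq, hc1, hc2, not_false_eq_true, and_self, if_true]
                      rw [ih t hlt, F_cons_other c t hc1 hc2]


-- ===== VERDICT (by name: the statement is the Claim_ definition above) =====
theorem gtk_to_kde_shortcut_py_spec : Claim_equal_gtk_to_kde_shortcut_py := by
  intro s _
  unfold Spec_gtk_to_kde_shortcut_py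
  apply String.toList_inj.mp
  rw [A_toList]
  rw [show (gtk_to_kde_shortcut_py_alt s).toList = pvScan s.toList by
        simp [gtk_to_kde_shortcut_py_alt]]
  rw [scan_eq_F s.toList.length s.toList le_rfl]
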